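-- pv_equiv track=rewrite | github.com/doum1004/code_assessment | leetcode/leetcode_py/determine-if-two-strings-are-close.py | closeStrings_1
-- ===== SOURCE A (Python) =====
-- def closeStrings_1(word1: str, word2: str) -> bool:
--     if len(word1) != len(word2): return False
--     c1 = [0] * 26
--     c2 = [0] * 26
--     for i in range(len(word1)):
--         c1[ord(word1[i])-ord('a')] += 1
--         c2[ord(word2[i])-ord('a')] += 1
--     for i in range(26):
--         if (c1[i] and not c2[i]) or (not c1[i] and c2[i]):
--             return False
--     c1.sort()
--     c2.sort()
--     return c1 == c2
-- ===== SOURCE B (Python) =====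
-- def closeStrings_1(word1: str, word2: str) -> bool:
--     # Sort each word and run-length encode it: the run heads are the distinct
--     # characters in increasing order, the run lengths are their frequencies.
--     def rle(s):
--         if not s:
--             return [], []
--         head = s[0]
--         i = 1
--         while i < len(s) and s[i] == head:
--             i += 1
--         chars, lens = rle(s[i:])
--         return [head] + chars, [i] + lens
--
--     c1, l1 = rle(sorted(word1))
--     c2, l2 = rle(sorted(word2))
--     return c1 == c2 and sorted(l1) == sorted(l2)
-- ===== Notes on version B (the rewrite author's own statement) =====
-- stated objective: alternative
-- what changed: Replaces A's 26-slot counting arrays, presence loop and padded-array sort by a sort-then-scan algorithm: each word is sorted and run-length encoded, the run heads (sorted distinct characters) are compared directly and the run lengths are compared as sorted multisets.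
-- outside the precondition, e.g. on closeStrings_1('G', 'a'): A returns True, B returns False
import Mathlib
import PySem

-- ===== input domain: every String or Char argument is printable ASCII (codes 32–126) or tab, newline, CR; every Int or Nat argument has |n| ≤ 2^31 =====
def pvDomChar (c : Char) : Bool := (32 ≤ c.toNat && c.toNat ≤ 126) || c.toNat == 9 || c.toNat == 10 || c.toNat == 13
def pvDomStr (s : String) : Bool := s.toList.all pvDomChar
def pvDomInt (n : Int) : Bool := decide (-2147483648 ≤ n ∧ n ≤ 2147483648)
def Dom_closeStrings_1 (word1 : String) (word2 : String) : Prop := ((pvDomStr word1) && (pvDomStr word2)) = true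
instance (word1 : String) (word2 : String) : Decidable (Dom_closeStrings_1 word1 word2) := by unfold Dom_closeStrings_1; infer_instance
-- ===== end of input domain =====

-- B replaces A's 26-slot count arrays, explicit length guard, presence loop and padded-array
-- sort by sorting each word and run-length encoding it: run heads (the sorted distinct
-- characters) are compared directly, run lengths as sorted multisets (objective: alternative).


-- ===== PORT A =====
-- c[i] += 1: read with pyGetD, write with pySet? (both exact under Pre_'s in-range indices);
-- the `none` arm is Python's IndexError, excluded by Pre_closeStrings_1
def pvBump (c : List Int) (i : Int) : List Int :=
  match PySem.List.pySet? c i (PySem.List.pyGetD c i 0 + 1) with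
  | some c' => c'
  | none => c

-- ord(w[i]) - ord('a'); i always comes from range(len(w)), so pyGetD's default is never read
def pvOrdIdx (w : List Char) (i : Int) : Int :=
  ((PySem.List.pyGetD w i 'a').toNat : Int) - 97

def closeStrings_1 (word1 : String) (word2 : String) : Bool :=
  let w1 := word1.toList
  let w2 := word2.toList
  if w1.length ≠ w2.length then false
  else
    let cc := (PySem.List.pyRange 0 (w1.length : Int) 1).foldl
      (fun (cc : List Int × List Int) i =>
        (pvBump cc.1 (pvOrdIdx w1 i), pvBump cc.2 (pvOrdIdx w2 i)))
      (List.replicate 26 0, List.replicate 26 0)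
    if (PySem.List.pyRange 0 26 1).any (fun i =>
        (!(PySem.List.pyGetD cc.1 i 0 == 0) && (PySem.List.pyGetD cc.2 i 0 == 0)) ||
        ((PySem.List.pyGetD cc.1 i 0 == 0) && !(PySem.List.pyGetD cc.2 i 0 == 0)))
    then false
    else PySem.List.sorted cc.1 (fun x => x) false == PySem.List.sorted cc.2 (fun x => x) false

-- ===== PORT B =====
-- rle(s): head = s[0]; the while loop advancing i over the equal prefix is takeWhile/dropWhile
-- (i = run.length + 1, s[i:] = rest); recursion on the rest, consing [head]+chars, [i]+lens
def pvRle : List Char → List Char × List Int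
  | [] => ([], [])
  | x :: t =>
    let run := t.takeWhile (fun c => c == x)
    let rest := t.dropWhile (fun c => c == x)
    let p := pvRle rest
    (x :: p.1, ((run.length + 1 : Nat) : Int) :: p.2)
termination_by s => s.length
decreasing_by
  have := List.length_dropWhile_le (fun c => c == x) t
  simp only [List.length_cons]
  omega

def closeStrings_1_alt (word1 : String) (word2 : String) : Bool :=
  let p1 := pvRle (PySem.List.sorted word1.toList (fun x => x) false)
  let p2 := pvRle (PySem.List.sorted word2.toList (fun x => x) false)
  p1.1 == p2.1 &&
    (PySem.List.sorted p1.2 (fun x => x) false == PySem.List.sorted p2.2 (fun x => x) false)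

-- ===== PRECONDITION & SPEC =====
-- Pre_ excludes equal-length pairs containing a non-lowercase character: on those A either raises
-- IndexError (a character with code outside 71..122) or returns a value only through Python's
-- negative-index wraparound (codes 71..96, 'G'..'`'), an artefact of A's 26-array indexing that
-- silently aliases each such character with the lowercase letter 26 codes above it.
def Pre_closeStrings_1 (word1 : String) (word2 : String) : Prop :=
  word1.toList.length ≠ word2.toList.length ∨
    ((word1.toList ++ word2.toList).all (fun c => 97 ≤ c.toNat && c.toNat ≤ 122)) = true
instance (word1 : String) (word2 : String) : Decidable (Pre_closeStrings_1 word1 word2) := by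
  unfold Pre_closeStrings_1; infer_instance

def pvWitness_closeStrings_1 : String × String := ("caabb", "abcba")

def Spec_closeStrings_1 (word1 : String) (word2 : String) (out : Bool) : Prop := out = closeStrings_1_alt word1 word2
instance (word1 : String) (word2 : String) (out : Bool) : Decidable (Spec_closeStrings_1 word1 word2 out) := by unfold Spec_closeStrings_1; infer_instance

-- ===== CLAIM (what is proved, stated in full; the proofs are below) =====
def Claim_equal_closeStrings_1 : Prop := ∀ (word1 : String) (word2 : String), Dom_closeStrings_1 word1 word2 → Pre_closeStrings_1 word1 word2 → Spec_closeStrings_1 word1 word2 (closeStrings_1 word1 word2)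

-- ===== LEMMAS AND PROOFS =====

-- the canonical 26-slot count table built by A's first loop
def pvCnt (w : List Char) : List Int :=
  (List.range 26).map (fun k => (w.count (Char.ofNat (97 + k)) : Int))

-- the multiset of counts of the distinct characters
def pvVals (w : List Char) : List Int :=
  (PySem.Set.ofList w).map (fun k => (w.count k : Int))

-- codes below the surrogate range round-trip through Char.ofNat
theorem pvChar_toNat_ofNat (n : Nat) (h : n < 55296) : (Char.ofNat n).toNat = n := by
  unfold Char.ofNat Char.toNat
  simp [Nat.isValidChar, h]

theorem pvBump_natCast (c : List Int) (n : Nat) (h : n < c.length) :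
    pvBump c (n : Int) = c.set n (c.getD n 0 + 1) := by
  simp [pvBump, PySem.List.pySet?_natCast c n _ h, PySem.List.pyGetD_natCast]

theorem pvFoldA (w : List Char) (hw : ∀ c ∈ w, 97 ≤ c.toNat ∧ c.toNat ≤ 122)
    (c : List Int) (hc : c.length = 26) :
    w.foldl (fun acc ch => pvBump acc ((ch.toNat : Int) - 97)) c
      = (List.range 26).map (fun k => c.getD k 0 + (w.count (Char.ofNat (97 + k)) : Int)) := by
  induction w generalizing c with
  | nil =>
    simp only [List.foldl_nil, List.count_nil]
    refine List.ext_getElem (by simp [hc]) ?_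
    intro k h1 h2
    simp at h2
    simp [hc, h2]
  | cons x t ih =>
    obtain ⟨hx1, hx2⟩ := hw x (by simp)
    have hidx : ((x.toNat : Int) - 97) = ((x.toNat - 97 : Nat) : Int) := by omega
    rw [List.foldl_cons, hidx, pvBump_natCast c _ (by omega),
      ih (fun c hc => hw c (by simp [hc])) _ (by simp [hc])]
    refine List.map_congr_left ?_
    intro k hk
    simp only [List.mem_range] at hk
    have hset : (c.set (x.toNat - 97) (c.getD (x.toNat - 97) 0 + 1)).getD k 0
        = c.getD k 0 + (if x.toNat - 97 = k then 1 else 0) := by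
      have hlt : x.toNat - 97 < c.length := by omega
      rcases eq_or_ne (x.toNat - 97) k with h | h
      · subst h
        simp [List.getD_eq_getElem?_getD, List.getElem?_set_self hlt,
          List.getElem?_eq_getElem hlt]
      · simp [List.getD_eq_getElem?_getD, List.getElem?_set_ne h, h]
    rw [hset]
    have hcount : (Char.ofNat (97 + k) = x) ↔ (x.toNat - 97 = k) := by
      constructor
      · intro h
        have := pvChar_toNat_ofNat (97 + k) (by omega)
        rw [h] at this; omega
      · intro h
        have hx : x.toNat = 97 + k := by omega
        have : (Char.ofNat (97 + k)).toNat = x.toNat := by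
          rw [pvChar_toNat_ofNat (97 + k) (by omega), hx]
        apply Char.ext
        have h2 : (Char.ofNat (97 + k)).val.toNat = x.val.toNat := this
        exact UInt32.toNat_inj.mp h2
    rw [List.count_cons]
    rcases eq_or_ne (x.toNat - 97) k with h | h
    · rw [if_pos h, if_pos (by simp [hcount.mpr h])]
      push_cast; ring
    · rw [if_neg h, if_neg (by simp [beq_iff_eq]; intro he; exact h (hcount.mp he.symm))]
      push_cast; ring

-- the present slots of the 26-slot table are exactly the distinct characters
theorem pvKeyPerm (w : List Char) (hw : ∀ c ∈ w, 97 ≤ c.toNat ∧ c.toNat ≤ 122) :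
    (((List.range 26).filter (fun k => decide (Char.ofNat (97 + k) ∈ w))).map
        (fun k => Char.ofNat (97 + k))).Perm (PySem.Set.ofList w) := by
  apply (List.perm_ext_iff_of_nodup ?_ (PySem.Set.nodup_ofList w)).mpr
  · intro y
    simp only [List.mem_map, List.mem_filter, List.mem_range, decide_eq_true_eq,
      PySem.Set.mem_ofList]
    constructor
    · rintro ⟨k, ⟨_, hm⟩, rfl⟩; exact hm
    · intro hy
      obtain ⟨h1, h2⟩ := hw y hy
      refine ⟨y.toNat - 97, ⟨by omega, ?_⟩, ?_⟩ <;>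
      · have he : 97 + (y.toNat - 97) = y.toNat := by omega
        have : Char.ofNat (97 + (y.toNat - 97)) = y := by
          rw [he]
          apply Char.ext
          have h3 : (Char.ofNat y.toNat).val.toNat = y.val.toNat :=
            pvChar_toNat_ofNat y.toNat (by omega)
          exact UInt32.toNat_inj.mp h3
        simp [this, hy]
  · refine List.Nodup.map_on ?_ (List.Nodup.filter _ List.nodup_range)
    intro a ha b hb he
    simp only [List.mem_filter, List.mem_range] at ha hb
    have h1 := pvChar_toNat_ofNat (97 + a) (by omega)
    have h2 := pvChar_toNat_ofNat (97 + b) (by omega)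
    rw [he] at h1; omega

-- multiset bridge: the 26-slot table is the distinct-count values padded with zeros
theorem pvCnt_perm (w : List Char) (hw : ∀ c ∈ w, 97 ≤ c.toNat ∧ c.toNat ≤ 122) :
    (pvCnt w).Perm (pvVals w ++ List.replicate (26 - (PySem.Set.ofList w).length) 0) := by
  classical
  set p : Nat → Bool := fun k => decide (Char.ofNat (97 + k) ∈ w) with hp
  have hsplit : ((List.range 26).filter p ++ (List.range 26).filter (fun k => !p k)).Perm
      (List.range 26) := List.filter_append_perm p (List.range 26)
  have hperm : (pvCnt w).Perm
      ((((List.range 26).filter p).map (fun k => (w.count (Char.ofNat (97 + k)) : Int))) ++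
       (((List.range 26).filter (fun k => !p k)).map
          (fun k => (w.count (Char.ofNat (97 + k)) : Int)))) := by
    unfold pvCnt
    rw [← List.map_append]
    exact (hsplit.map _).symm
  have hzero : (((List.range 26).filter (fun k => !p k)).map
      (fun k => (w.count (Char.ofNat (97 + k)) : Int)))
      = List.replicate (26 - (PySem.Set.ofList w).length) 0 := by
    rw [List.eq_replicate_iff]
    constructor
    · rw [List.length_map]
      have hlen : ((List.range 26).filter p).length = (PySem.Set.ofList w).length := by
        have := (pvKeyPerm w hw).length_eq
        simpa using this
      have htot := hsplit.length_eq
      simp only [List.length_append, List.length_range] at htot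
      omega
    · intro b hb
      simp only [List.mem_map, List.mem_filter, List.mem_range, Bool.not_eq_true'] at hb
      obtain ⟨k, ⟨_, hk⟩, rfl⟩ := hb
      simp only [hp, decide_eq_false_iff_not] at hk
      simp [List.count_eq_zero.mpr hk]
  have hvals : ((((List.range 26).filter p).map
      (fun k => (w.count (Char.ofNat (97 + k)) : Int)))).Perm (pvVals w) := by
    have : (((List.range 26).filter p).map (fun k => (w.count (Char.ofNat (97 + k)) : Int)))
        = ((((List.range 26).filter p).map (fun k => Char.ofNat (97 + k))).map
            (fun ch => (w.count ch : Int))) := by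
      rw [List.map_map]
      rfl
    rw [this]
    exact (pvKeyPerm w hw).map _
  exact hperm.trans (List.Perm.append hvals (hzero ▸ List.Perm.refl _))

theorem pvVals_sum (w : List Char) : (pvVals w).sum = (w.length : Int) := by
  have hperm : (PySem.Set.ofList w).Perm w.dedup := by
    apply (List.perm_ext_iff_of_nodup (PySem.Set.nodup_ofList w) (List.nodup_dedup w)).mpr
    intro x
    simp [PySem.Set.mem_ofList]
  have hs := (hperm.map (fun k => (w.count k : Int))).sum_eq
  unfold pvVals
  rw [hs]
  have : (w.dedup.map fun k => (w.count k : Int)) = (w.dedup.map w.count).map (Nat.cast) := by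
    rw [List.map_map]; rfl
  rw [this, ← Nat.cast_list_sum, List.sum_map_count_dedup_eq_length]

-- run-length encoding of a sorted list: strictly increasing heads that enumerate the
-- members, with the member counts as lengths
theorem pvRle_spec (s : List Char) (hs : s.Pairwise (· ≤ ·)) :
    (pvRle s).1.Pairwise (· < ·) ∧ (∀ x, x ∈ (pvRle s).1 ↔ x ∈ s) ∧
      (pvRle s).2 = (pvRle s).1.map (fun c => (s.count c : Int)) := by
  match s, hs with
  | [], _ => simp [pvRle]
  | x :: t, hs =>
    rw [List.pairwise_cons] at hs
    obtain ⟨hxle, ht⟩ := hs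
    have heq : pvRle (x :: t)
        = (x :: (pvRle (t.dropWhile (fun c => c == x))).1,
           (((t.takeWhile (fun c => c == x)).length + 1 : Nat) : Int)
             :: (pvRle (t.dropWhile (fun c => c == x))).2) := by
      rw [pvRle]
    set run := t.takeWhile (fun c => c == x) with hrun
    set rest := t.dropWhile (fun c => c == x) with hrest
    have htrr : run ++ rest = t := List.takeWhile_append_dropWhile
    have hrunx : ∀ c ∈ run, c = x := by
      intro c hc
      have := List.mem_takeWhile_imp hc
      simpa [beq_iff_eq] using this
    have hrestp : rest.Pairwise (· ≤ ·) := ht.sublist ((List.dropWhile_suffix _).sublist)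
    have hrestlt : ∀ c ∈ rest, x < c := by
      intro c hc
      rcases hr : rest with _ | ⟨r0, rt⟩
      · simp [hr] at hc
      · have hr0ne : ¬ (r0 == x) = true := by
          have := List.head?_dropWhile_not (fun c => c == x) t
          rw [← hrest, hr] at this
          simpa using this
        have hr0t : r0 ∈ t := htrr ▸ List.mem_append_right _ (by simp [hr])
        have hxr0 : x < r0 := lt_of_le_of_ne (hxle r0 hr0t) (by
          intro h; exact hr0ne (by simp [h.symm]))
        rw [hr] at hc
        rcases List.mem_cons.mp hc with rfl | hc2
        · exact hxr0
        · have hp2 := hrestp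
          rw [hr, List.pairwise_cons] at hp2
          exact lt_of_lt_of_le hxr0 (hp2.1 c hc2)
    have hlen : rest.length < (x :: t).length := by
      have := List.length_dropWhile_le (fun c => c == x) t
      rw [hrest]
      simp only [List.length_cons]
      omega
    obtain ⟨ih1, ih2, ih3⟩ := pvRle_spec rest hrestp
    rw [heq]
    have hcx : (x :: t).count x = run.length + 1 := by
      rw [← htrr, List.count_cons_self, List.count_append,
        List.count_eq_length.mpr (fun c hc => (hrunx c hc).symm),
        List.count_eq_zero.mpr (fun hm => lt_irrefl x (hrestlt x hm))]
    have hcr : ∀ c ∈ (pvRle rest).1, (x :: t).count c = rest.count c := by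
      intro c hc
      have hcm : c ∈ rest := (ih2 c).mp hc
      have hcx' : c ≠ x := fun h => lt_irrefl x (h ▸ hrestlt c hcm)
      rw [← htrr, List.count_cons_of_ne (Ne.symm hcx'), List.count_append,
        List.count_eq_zero.mpr (fun hm => hcx' (hrunx c hm)), Nat.zero_add]
    refine ⟨?_, ?_, ?_⟩
    · rw [List.pairwise_cons]
      exact ⟨fun c hc => hrestlt c ((ih2 c).mp hc), ih1⟩
    · intro y
      simp only [List.mem_cons, ih2]
      constructor
      · rintro (rfl | h)
        · exact Or.inl rfl
        · refine Or.inr ?_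
          rw [← htrr]
          exact List.mem_append_right _ h
      · rintro (rfl | h)
        · exact Or.inl rfl
        · have hm : y ∈ run ++ rest := by rw [htrr]; exact h
          rcases List.mem_append.mp hm with hm1 | hm2
          · exact Or.inl (hrunx y hm1)
          · exact Or.inr hm2
    · dsimp only
      rw [List.map_cons, hcx, ih3]
      congr 1
      refine List.map_congr_left ?_
      intro c hc
      rw [hcr c hc]
termination_by s.length
decreasing_by
  simpa using hlen

-- the run heads of the sorted word
def pvChars (w : List Char) : List Char :=
  (pvRle (PySem.List.sorted w (fun x => x) false)).1

theorem pvChars_spec (w : List Char) :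
    (pvChars w).Pairwise (· < ·) ∧ (∀ x, x ∈ pvChars w ↔ x ∈ w) := by
  have hp : (PySem.List.sorted w (fun x => x) false).Pairwise (· ≤ ·) :=
    PySem.List.sorted_pairwise w (fun x => x)
  obtain ⟨h1, h2, _⟩ := pvRle_spec _ hp
  exact ⟨h1, fun x => (h2 x).trans (PySem.List.mem_sorted ..)⟩

theorem pvChars_perm (w : List Char) : (pvChars w).Perm (PySem.Set.ofList w) := by
  obtain ⟨h1, h2⟩ := pvChars_spec w
  refine (List.perm_ext_iff_of_nodup h1.nodup (PySem.Set.nodup_ofList w)).mpr ?_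
  intro x; rw [h2, PySem.Set.mem_ofList]

-- the run lengths of the sorted word are a permutation of the distinct-count values
theorem pvLens_perm (w : List Char) :
    ((pvRle (PySem.List.sorted w (fun x => x) false)).2).Perm (pvVals w) := by
  have hp : (PySem.List.sorted w (fun x => x) false).Pairwise (· ≤ ·) :=
    PySem.List.sorted_pairwise w (fun x => x)
  obtain ⟨_, _, h3⟩ := pvRle_spec _ hp
  rw [h3]
  have hcnt : ∀ c : Char, (PySem.List.sorted w (fun x => x) false).count c = w.count c :=
    fun c => (PySem.List.sorted_perm ..).count_eq c
  have : ((pvRle (PySem.List.sorted w (fun x => x) false)).1.map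
      (fun c => ((PySem.List.sorted w (fun x => x) false).count c : Int)))
      = (pvChars w).map (fun c => (w.count c : Int)) := by
    refine List.map_congr_left ?_
    intro c _
    rw [hcnt c]
  rw [this]
  exact (pvChars_perm w).map _

-- B computes key-set equality and the sorted distinct-count multisets
theorem pvAlt_eq (word1 word2 : String) :
    closeStrings_1_alt word1 word2 =
      (PySem.Set.equal (PySem.Set.ofList word1.toList) (PySem.Set.ofList word2.toList) &&
       (PySem.List.sorted (pvVals word1.toList) (fun x => x) false ==
        PySem.List.sorted (pvVals word2.toList) (fun x => x) false)) := by
  simp only [closeStrings_1_alt]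
  congr 1
  · -- run-head equality = set equality
    apply Bool.coe_iff_coe.mp
    rw [beq_iff_eq, PySem.Set.equal_iff]
    constructor
    · intro h x
      rw [PySem.Set.mem_ofList, PySem.Set.mem_ofList, ← (pvChars_spec word1.toList).2,
        ← (pvChars_spec word2.toList).2,
        show pvChars word1.toList = pvChars word2.toList from h]
    · intro h
      have hperm : (pvChars word1.toList).Perm (pvChars word2.toList) := by
        refine (List.perm_ext_iff_of_nodup
          (pvChars_spec word1.toList).1.nodup (pvChars_spec word2.toList).1.nodup).mpr ?_
        intro x
        rw [(pvChars_spec word1.toList).2, (pvChars_spec word2.toList).2]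
        simpa [PySem.Set.mem_ofList] using h x
      have e1 : PySem.List.sorted (pvChars word2.toList) (fun x => x) false
          = pvChars word1.toList :=
        PySem.List.sorted_eq_of_perm_of_pairwise_lt _ _ _ hperm (pvChars_spec word1.toList).1
      have e2 : PySem.List.sorted (pvChars word2.toList) (fun x => x) false
          = pvChars word2.toList :=
        PySem.List.sorted_eq_of_perm_of_pairwise_lt _ _ _ (List.Perm.refl _)
          (pvChars_spec word2.toList).1
      show pvChars word1.toList = pvChars word2.toList
      rw [← e1, e2]
  · -- sorted run lengths = sorted distinct-count values
    apply Bool.coe_iff_coe.mp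
    rw [beq_iff_eq, beq_iff_eq, PySem.List.sorted_id_eq_sorted_id_iff_perm,
      PySem.List.sorted_id_eq_sorted_id_iff_perm]
    constructor
    · intro h
      exact ((pvLens_perm word1.toList).symm.trans h).trans (pvLens_perm word2.toList)
    · intro h
      exact ((pvLens_perm word1.toList).trans h).trans (pvLens_perm word2.toList).symm

-- if B's count-multisets agree, the words have the same length
theorem pvAlt_len (w1 w2 : List Char)
    (hs : (pvVals w1).Perm (pvVals w2)) : w1.length = w2.length := by
  have h1 := pvVals_sum w1
  have h2 := pvVals_sum w2
  have := hs.sum_eq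
  omega

theorem pvMain (word1 word2 : String)
    (hpre : word1.toList.length ≠ word2.toList.length ∨
      ((word1.toList ++ word2.toList).all (fun c => 97 ≤ c.toNat && c.toNat ≤ 122)) = true) :
    closeStrings_1 word1 word2 = closeStrings_1_alt word1 word2 := by
  rw [pvAlt_eq]
  by_cases hlen : word1.toList.length = word2.toList.length
  · -- equal lengths: all characters are lowercase
    have hall : ∀ c ∈ word1.toList ++ word2.toList, 97 ≤ c.toNat ∧ c.toNat ≤ 122 := by
      rcases hpre with h | h
      · exact absurd hlen h
      · intro c hc
        have := List.all_eq_true.mp h c hc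
        simp at this
        omega
    have hw1 : ∀ c ∈ word1.toList, 97 ≤ c.toNat ∧ c.toNat ≤ 122 :=
      fun c hc => hall c (List.mem_append_left _ hc)
    have hw2 : ∀ c ∈ word2.toList, 97 ≤ c.toNat ∧ c.toNat ≤ 122 :=
      fun c hc => hall c (List.mem_append_right _ hc)
    -- the counting loop builds the two 26-slot tables
    have hfold : ∀ (w : List Char), (∀ c ∈ w, 97 ≤ c.toNat ∧ c.toNat ≤ 122) →
        (PySem.List.pyRange 0 (w.length : Int)).foldl
          (fun acc i => pvBump acc (pvOrdIdx w i)) (List.replicate 26 0) = pvCnt w := by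
      intro w hw
      have hb : (PySem.List.pyRange 0 (w.length : Int)).foldl
            (fun acc i => pvBump acc (pvOrdIdx w i)) (List.replicate 26 0)
          = w.foldl (fun acc ch => pvBump acc ((ch.toNat : Int) - 97)) (List.replicate 26 0) :=
        PySem.List.foldl_pyRange_zero_pyGetD' w 'a'
          (fun acc ch => pvBump acc ((ch.toNat : Int) - 97)) (List.replicate 26 0)
      rw [hb, pvFoldA w hw _ (by simp)]
      unfold pvCnt
      refine List.map_congr_left ?_
      intro k hk
      simp only [List.mem_range] at hk
      rw [List.getD_eq_getElem _ _ (by simp [hk]), List.getElem_replicate]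
      ring
    have hcc : (PySem.List.pyRange 0 (word1.toList.length : Int)).foldl
        (fun (cc : List Int × List Int) i =>
          (pvBump cc.1 (pvOrdIdx word1.toList i), pvBump cc.2 (pvOrdIdx word2.toList i)))
        (List.replicate 26 0, List.replicate 26 0) = (pvCnt word1.toList, pvCnt word2.toList) := by
      rw [PySem.List.foldl_prod_mk (f := fun acc i => pvBump acc (pvOrdIdx word1.toList i))
        (g := fun acc i => pvBump acc (pvOrdIdx word2.toList i))]
      rw [hfold word1.toList hw1, hlen, hfold word2.toList hw2]
    simp only [closeStrings_1]
    rw [if_neg (by omega), hcc]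
    -- slot lookup in a count table
    have hg : ∀ (w : List Char) (i : Int), 0 ≤ i → i < 26 →
        PySem.List.pyGetD (pvCnt w) i 0 = (w.count (Char.ofNat (97 + i.toNat)) : Int) := by
      intro w i h0 h26
      rw [PySem.List.pyGetD_of_nonneg _ _ h0]
      exact PySem.List.getD_map_range _ 26 i.toNat 0 (by omega)
    -- the presence loop is the negation of B's key-set equality
    have hany : ((PySem.List.pyRange 0 26).any (fun i =>
        (!(PySem.List.pyGetD (pvCnt word1.toList) i 0 == 0) &&
          (PySem.List.pyGetD (pvCnt word2.toList) i 0 == 0)) ||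
        ((PySem.List.pyGetD (pvCnt word1.toList) i 0 == 0) &&
          !(PySem.List.pyGetD (pvCnt word2.toList) i 0 == 0))) = true)
        ↔ ¬ (PySem.Set.equal (PySem.Set.ofList word1.toList)
              (PySem.Set.ofList word2.toList) = true) := by
      rw [List.any_eq_true, PySem.Set.equal_iff]
      constructor
      · rintro ⟨i, hi, hf⟩ hek
        rw [PySem.List.mem_pyRange_one] at hi
        rw [hg _ _ hi.1 hi.2, hg _ _ hi.1 hi.2] at hf
        have hx := hek (Char.ofNat (97 + i.toNat))
        simp only [PySem.Set.mem_ofList] at hx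
        by_cases hm : Char.ofNat (97 + i.toNat) ∈ word1.toList
        · have h1 : word1.toList.count (Char.ofNat (97 + i.toNat)) ≠ 0 := by
            simpa [List.count_eq_zero] using hm
          have h2 : word2.toList.count (Char.ofNat (97 + i.toNat)) ≠ 0 := by
            simpa [List.count_eq_zero] using hx.mp hm
          simp [h1, h2] at hf
        · have h1 : word1.toList.count (Char.ofNat (97 + i.toNat)) = 0 :=
            List.count_eq_zero.mpr hm
          have h2 : word2.toList.count (Char.ofNat (97 + i.toNat)) = 0 :=
            List.count_eq_zero.mpr (fun hm2 => hm (hx.mpr hm2))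
          simp [h1, h2] at hf
      · intro hne
        have hex : ∃ x, ¬ (x ∈ word1.toList ↔ x ∈ word2.toList) := by
          by_contra hco
          exact hne fun x => by
            have := forall_not_of_not_exists hco x
            simp only [not_not] at this
            simpa [PySem.Set.mem_ofList] using this
        obtain ⟨x, hx⟩ := hex
        have hxl : 97 ≤ x.toNat ∧ x.toNat ≤ 122 := by
          by_cases h : x ∈ word1.toList
          · exact hw1 x h
          · exact hw2 x (by tauto)
        refine ⟨((x.toNat - 97 : Nat) : Int), ?_, ?_⟩
        · rw [PySem.List.mem_pyRange_one]
          omega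
        · have hchr : Char.ofNat (97 + ((x.toNat - 97 : Nat) : Int).toNat) = x := by
            have : 97 + ((x.toNat - 97 : Nat) : Int).toNat = x.toNat := by omega
            rw [this, Char.ofNat_toNat]
          rw [hg _ _ (by omega) (by omega), hg _ _ (by omega) (by omega), hchr]
          by_cases hm : x ∈ word1.toList
          · have h1 : word1.toList.count x ≠ 0 := by simpa [List.count_eq_zero] using hm
            have h2 : word2.toList.count x = 0 := List.count_eq_zero.mpr (by tauto)
            simp [h1, h2]
          · have h1 : word1.toList.count x = 0 := List.count_eq_zero.mpr hm
            have h2 : word2.toList.count x ≠ 0 := by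
              intro h2m
              rw [List.count_eq_zero] at h2m
              exact hx (by tauto)
            simp [h1, h2]
    by_cases he : PySem.Set.equal (PySem.Set.ofList word1.toList)
        (PySem.Set.ofList word2.toList) = true
    · rw [if_neg (fun h => (hany.mp h) he), he, Bool.true_and]
      -- both sides now compare sorted lists; link them through the zero padding
      have hS : (PySem.Set.ofList word1.toList).Perm (PySem.Set.ofList word2.toList) :=
        (List.perm_ext_iff_of_nodup (PySem.Set.nodup_ofList _) (PySem.Set.nodup_ofList _)).mpr
          (PySem.Set.equal_iff _ _ |>.mp he)
      have hlenS := hS.length_eq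
      have p1 := pvCnt_perm word1.toList hw1
      have p2 := pvCnt_perm word2.toList hw2
      rw [hlenS] at p1
      have hiff : (pvCnt word1.toList).Perm (pvCnt word2.toList) ↔
          (pvVals word1.toList).Perm (pvVals word2.toList) := by
        constructor
        · intro h
          exact (List.perm_append_right_iff _).mp ((p1.symm.trans h).trans p2)
        · intro h
          exact (p1.trans ((List.perm_append_right_iff _).mpr h)).trans p2.symm
      apply Bool.coe_iff_coe.mp
      rw [beq_iff_eq, beq_iff_eq, PySem.List.sorted_id_eq_sorted_id_iff_perm,
        PySem.List.sorted_id_eq_sorted_id_iff_perm]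
      exact hiff
    · rw [if_pos (hany.mpr he), Bool.eq_false_iff.mpr he, Bool.false_and]
  · -- unequal lengths: A returns False, and B's two tests cannot both pass
    have hA : closeStrings_1 word1 word2 = false := by
      simp only [closeStrings_1]
      rw [if_pos hlen]
    rw [hA]
    by_cases he : PySem.Set.equal (PySem.Set.ofList word1.toList)
        (PySem.Set.ofList word2.toList) = true
    · by_cases hs : (PySem.List.sorted (pvVals word1.toList) (fun x => x) false ==
          PySem.List.sorted (pvVals word2.toList) (fun x => x) false) = true
      · exfalso
        rw [beq_iff_eq, PySem.List.sorted_id_eq_sorted_id_iff_perm] at hs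
        exact hlen (pvAlt_len word1.toList word2.toList hs)
      · simp [Bool.eq_false_iff.mpr hs]
    · simp [Bool.eq_false_iff.mpr he]

-- ===== VERDICT (by name: the statement is the Claim_ definition above) =====
theorem closeStrings_1_spec : Claim_equal_closeStrings_1 :=
  fun word1 word2 _ hpre => pvMain word1 word2 hpre
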